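-- pv_equiv track=rewrite | github.com/jonhuth/dsa | Arrays/max_improvement.py | maxImprovement
-- ===== SOURCE A (Python) =====
-- def maxImprovement(students, scores):
--     # time: O(n) | space: O(n) where n = len of students arr
--     maxDiff = 0
--     m = {}  # student: minScore
--     for i, student in enumerate(students):
--         if student not in m:
--             m[student] = scores[i]
--         else:
--             m[student] = min(m[student], scores[i])
--         maxDiff = max(maxDiff, scores[i] - m[student])
--
--     return maxDiff
-- ===== SOURCE B (Python) =====
-- def maxImprovement(students, scores):
--     # brute force: for each entry, scan the earlier entries of the same student
--     # for the smallest score; keep the best (non-negative) difference seen.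
--     best = 0
--     for i in range(len(students)):
--         low = scores[i]
--         for j in range(i):
--             if students[j] == students[i] and scores[j] < low:
--                 low = scores[j]
--         if scores[i] - low > best:
--             best = scores[i] - low
--     return best
-- ===== Notes on version B (the rewrite author's own statement) =====
-- stated objective: alternative
-- what changed: replaces the single pass with a running-minimum dict by a direct nested scan: for each entry, the minimum earlier score of the same student is recomputed by scanning the prefix, with no auxiliary map
import Mathlib
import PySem

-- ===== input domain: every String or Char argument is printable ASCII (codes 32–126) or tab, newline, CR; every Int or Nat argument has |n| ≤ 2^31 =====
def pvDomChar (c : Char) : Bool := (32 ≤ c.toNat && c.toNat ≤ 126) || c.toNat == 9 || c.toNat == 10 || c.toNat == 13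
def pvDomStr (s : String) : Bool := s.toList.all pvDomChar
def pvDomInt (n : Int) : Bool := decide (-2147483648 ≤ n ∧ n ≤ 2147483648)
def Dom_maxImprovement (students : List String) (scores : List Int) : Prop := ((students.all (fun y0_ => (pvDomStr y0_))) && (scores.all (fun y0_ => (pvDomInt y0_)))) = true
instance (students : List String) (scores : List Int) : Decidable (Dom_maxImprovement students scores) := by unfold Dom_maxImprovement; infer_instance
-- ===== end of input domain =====

-- B replaces A's single pass with a running-minimum dict by a direct nested scan
-- (for each entry, rescan the prefix for the smallest earlier score of the same
-- student); alternative decomposition, not faster.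

-- ===== PORT A =====
-- one iteration of A's loop body (closes over scores; state = (maxDiff, m))
def stepA (scores : List Int) (st : Int × PySem.Dict String Int) (p : Int × String) :
    Int × PySem.Dict String Int :=
  let x := PySem.List.pyGetD scores p.1 0   -- scores[i]; Pre_ keeps the index in range
  let m' := if st.2.contains p.2 = false
            then st.2.insert p.2 x
            else st.2.insert p.2 (min ((st.2.get? p.2).getD 0) x)
  (max st.1 (x - ((m'.get? p.2).getD 0)), m')

def maxImprovement (students : List String) (scores : List Int) : Int :=
  ((PySem.List.enumerate students 0).foldl (stepA scores) (0, PySem.Dict.empty)).1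

-- ===== PORT B =====
-- B's inner loop: smallest scores[j] over j < i with students[j] == students[i],
-- starting from scores[i]
def innerLow (students : List String) (scores : List Int) (i : Int) : Int :=
  (PySem.List.pyRange 0 i 1).foldl
    (fun low j =>
      if PySem.List.pyGetD students j "" = PySem.List.pyGetD students i "" ∧
         PySem.List.pyGetD scores j 0 < low
      then PySem.List.pyGetD scores j 0 else low)
    (PySem.List.pyGetD scores i 0)

def maxImprovement_alt (students : List String) (scores : List Int) : Int :=
  (PySem.List.pyRange 0 (students.length : Int) 1).foldl
    (fun best i =>
      let low := innerLow students scores i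
      if best < PySem.List.pyGetD scores i 0 - low
      then PySem.List.pyGetD scores i 0 - low else best)
    0

-- ===== PRECONDITION & SPEC =====
-- Python A raises IndexError at scores[i] as soon as scores is shorter than
-- students; Pre_ excludes exactly those inputs (B raises there too).
def Pre_maxImprovement (students : List String) (scores : List Int) : Prop :=
  students.length ≤ scores.length
instance (students : List String) (scores : List Int) : Decidable (Pre_maxImprovement students scores) := by unfold Pre_maxImprovement; infer_instance

def pvWitness_maxImprovement : List String × List Int :=
  (["ann", "bob", "ann"], [5, 1, 9])

def Spec_maxImprovement (students : List String) (scores : List Int) (out : Int) : Prop := out = maxImprovement_alt students scores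
instance (students : List String) (scores : List Int) (out : Int) : Decidable (Spec_maxImprovement students scores out) := by unfold Spec_maxImprovement; infer_instance

-- ===== CLAIM (what is proved, stated in full; the proofs are below) =====
def Claim_equal_maxImprovement : Prop := ∀ (students : List String) (scores : List Int), Dom_maxImprovement students scores → Pre_maxImprovement students scores → Spec_maxImprovement students scores (maxImprovement students scores)

-- ===== LEMMAS AND PROOFS =====

-- B's inner scan restricted to a prefix list s, with an arbitrary start value x
def prefLow (s : List String) (c : List Int) (t : String) (x : Int) : Int :=
  (PySem.List.pyRange 0 (s.length : Int) 1).foldl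
    (fun low j =>
      if PySem.List.pyGetD s j "" = t ∧ PySem.List.pyGetD c j 0 < low
      then PySem.List.pyGetD c j 0 else low) x

lemma pyGetD_append_lt {α : Type} (xs : List α) (y : α) (j : Int) (d : α)
    (h0 : 0 ≤ j) (h : j < (xs.length : Int)) :
    PySem.List.pyGetD (xs ++ [y]) j d = PySem.List.pyGetD xs j d := by
  rw [PySem.List.pyGetD_eq_getElem _ d h0 (by simp; omega),
      PySem.List.pyGetD_eq_getElem _ d h0 h]
  exact List.getElem_append_left (by omega)

lemma pyGetD_append_self {α : Type} (xs : List α) (y : α) (d : α) :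
    PySem.List.pyGetD (xs ++ [y]) (xs.length : Int) d = y := by
  rw [PySem.List.pyGetD_eq_getElem _ d (by positivity) (by simp)]
  simp

lemma prefLow_append (s : List String) (t' : String) (c : List Int) (t : String) (x0 : Int) :
    prefLow (s ++ [t']) c t x0 =
      (if t' = t ∧ PySem.List.pyGetD c (s.length : Int) 0 < prefLow s c t x0
       then PySem.List.pyGetD c (s.length : Int) 0 else prefLow s c t x0) := by
  unfold prefLow
  have hlen : (((s ++ [t']).length : Nat) : Int) = (s.length : Int) + 1 := by simp
  have hpre : List.foldl
      (fun low j =>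
        if PySem.List.pyGetD (s ++ [t']) j "" = t ∧ PySem.List.pyGetD c j 0 < low
        then PySem.List.pyGetD c j 0 else low) x0 (PySem.List.pyRange 0 (s.length : Int) 1)
      = List.foldl
      (fun low j =>
        if PySem.List.pyGetD s j "" = t ∧ PySem.List.pyGetD c j 0 < low
        then PySem.List.pyGetD c j 0 else low) x0 (PySem.List.pyRange 0 (s.length : Int) 1) := by
    apply PySem.List.foldl_congr_mem
    intro acc j hj
    rw [PySem.List.mem_pyRange_one] at hj
    rw [pyGetD_append_lt _ _ _ _ hj.1 hj.2]
  rw [hlen, PySem.List.pyRange_one_succ_right (by positivity), List.foldl_append]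
  simp only [List.foldl_cons, List.foldl_nil]
  rw [pyGetD_append_self, hpre]

lemma innerLow_append_last (s : List String) (t' : String) (c : List Int) :
    innerLow (s ++ [t']) c (s.length : Int)
      = prefLow s c t' (PySem.List.pyGetD c (s.length : Int) 0) := by
  unfold innerLow prefLow
  rw [pyGetD_append_self]
  apply PySem.List.foldl_congr_mem
  intro acc j hj
  rw [PySem.List.mem_pyRange_one] at hj
  rw [pyGetD_append_lt _ _ _ _ hj.1 hj.2]

lemma innerLow_append_lt (s : List String) (t' : String) (c : List Int) (i : Int)
    (h0 : 0 ≤ i) (h : i < (s.length : Int)) :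
    innerLow (s ++ [t']) c i = innerLow s c i := by
  unfold innerLow
  rw [pyGetD_append_lt _ _ _ _ h0 h]
  apply PySem.List.foldl_congr_mem
  intro acc j hj
  rw [PySem.List.mem_pyRange_one] at hj
  rw [pyGetD_append_lt _ _ _ _ hj.1 (lt_trans hj.2 h)]

-- projections of one A-step, with 'contains' phrased through get?
lemma stepA_snd (c : List Int) (st : Int × PySem.Dict String Int) (i : Int) (t : String) :
    (stepA c st (i, t)).2 =
      (if (st.2.get? t).isSome = false
       then st.2.insert t (PySem.List.pyGetD c i 0)
       else st.2.insert t (min ((st.2.get? t).getD 0) (PySem.List.pyGetD c i 0))) := by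
  simp [stepA, PySem.Dict.contains_eq_isSome_get?]

lemma stepA_fst (c : List Int) (st : Int × PySem.Dict String Int) (i : Int) (t : String) :
    (stepA c st (i, t)).1 =
      max st.1 (PySem.List.pyGetD c i 0 -
        (((if (st.2.get? t).isSome = false
           then st.2.insert t (PySem.List.pyGetD c i 0)
           else st.2.insert t (min ((st.2.get? t).getD 0) (PySem.List.pyGetD c i 0))).get?
           t).getD 0)) := by
  simp [stepA, PySem.Dict.contains_eq_isSome_get?]

-- the dict A maintains characterises B's prefix scan
lemma dictA_char (s : List String) (c : List Int) (t : String) :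
    (match (((PySem.List.enumerate s 0).foldl (stepA c) (0, PySem.Dict.empty)).2.get? t) with
     | none => ∀ x, prefLow s c t x = x
     | some v => ∀ x, prefLow s c t x = min x v) := by
  induction s using List.reverseRecOn with
  | nil =>
    simp only [PySem.List.enumerate_nil, List.foldl_nil, PySem.Dict.get?_empty]
    intro x
    unfold prefLow
    simp [PySem.List.pyRange_one_eq_nil]
  | append_singleton s t' ih =>
    rw [PySem.List.enumerate_append, List.foldl_append]
    simp only [PySem.List.enumerate_cons, PySem.List.enumerate_nil, List.foldl_cons,
      List.foldl_nil, zero_add]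
    rw [stepA_snd]
    by_cases ht : t = t'
    · subst ht
      cases hg : (((PySem.List.enumerate s 0).foldl (stepA c) (0, PySem.Dict.empty)).2.get? t) with
      | none =>
        rw [hg] at ih
        have ih' : ∀ x, prefLow s c t x = x := ih
        rw [if_pos (by simp), PySem.Dict.get?_insert_self]
        intro x
        rw [prefLow_append, ih' x]
        simp only [true_and]
        split_ifs <;> omega
      | some v =>
        rw [hg] at ih
        have ih' : ∀ x, prefLow s c t x = min x v := ih
        rw [if_neg (by simp), Option.getD_some, PySem.Dict.get?_insert_self]
        intro x
        rw [prefLow_append, ih' x]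
        simp only [true_and]
        split_ifs <;> omega
    · rw [apply_ite (fun dd : PySem.Dict String Int => dd.get? t),
        PySem.Dict.get?_insert_of_ne _ _ ht, PySem.Dict.get?_insert_of_ne _ _ ht, ite_self]
      rcases hg : (((PySem.List.enumerate s 0).foldl (stepA c) (0, PySem.Dict.empty)).2.get? t)
        with _ | v
      · rw [hg] at ih
        have ih' : ∀ x, prefLow s c t x = x := ih
        intro x
        rw [prefLow_append, if_neg (fun h => ht h.1.symm)]
        exact ih' x
      · rw [hg] at ih
        have ih' : ∀ x, prefLow s c t x = min x v := ih
        intro x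
        rw [prefLow_append, if_neg (fun h => ht h.1.symm)]
        exact ih' x

lemma acc_eq (s : List String) (c : List Int) :
    (((PySem.List.enumerate s 0).foldl (stepA c) (0, PySem.Dict.empty)).1)
      = maxImprovement_alt s c := by
  induction s using List.reverseRecOn with
  | nil =>
    unfold maxImprovement_alt
    simp [PySem.List.enumerate_nil, PySem.List.pyRange_one_eq_nil]
  | append_singleton s t' ih =>
    rw [PySem.List.enumerate_append, List.foldl_append]
    simp only [PySem.List.enumerate_cons, PySem.List.enumerate_nil, List.foldl_cons,
      List.foldl_nil, zero_add]
    unfold maxImprovement_alt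
    have hlen : (((s ++ [t']).length : Nat) : Int) = (s.length : Int) + 1 := by simp
    rw [hlen, PySem.List.pyRange_one_succ_right (by positivity), List.foldl_append]
    simp only [List.foldl_cons, List.foldl_nil]
    have houter : (PySem.List.pyRange 0 (s.length : Int) 1).foldl
        (fun best i =>
          let low := innerLow (s ++ [t']) c i
          if best < PySem.List.pyGetD c i 0 - low
          then PySem.List.pyGetD c i 0 - low else best) 0
        = maxImprovement_alt s c := by
      unfold maxImprovement_alt
      apply PySem.List.foldl_congr_mem
      intro acc i hi
      rw [PySem.List.mem_pyRange_one] at hi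
      simp only [innerLow_append_lt _ _ _ _ hi.1 hi.2]
    rw [houter]
    simp only [innerLow_append_last]
    rw [stepA_fst, ih]
    have hchar := dictA_char s c t'
    cases hg : (((PySem.List.enumerate s 0).foldl (stepA c) (0, PySem.Dict.empty)).2.get? t') with
    | none =>
      rw [hg] at hchar
      have hch : ∀ x, prefLow s c t' x = x := hchar
      rw [if_pos (by simp), PySem.Dict.get?_insert_self, Option.getD_some, hch]
      split_ifs <;> omega
    | some v =>
      rw [hg] at hchar
      have hch : ∀ x, prefLow s c t' x = min x v := hchar
      rw [if_neg (by simp), Option.getD_some, PySem.Dict.get?_insert_self, Option.getD_some, hch]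
      split_ifs <;> omega

-- ===== VERDICT (by name: the statement is the Claim_ definition above) =====
theorem maxImprovement_spec : Claim_equal_maxImprovement := by
  intro students scores _ _
  unfold Spec_maxImprovement maxImprovement
  exact acc_eq students scores
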